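-- pv_equiv track=rewrite | github.com/crmackvery/advent_of_code_2022 | days/day10.py | find_index_of_nth_cycle
-- ===== SOURCE A (Python) =====
-- def find_index_of_nth_cycle(commands, n) -> int:
--     cycle = 0
--     idx = 0
--     for c in commands:
--         if c == "noop":
--             cycle += 1
--         else:
--             cycle += 2
--
--         idx += 1
--         if cycle >= n:
--             break
--
--     if cycle >= n:
--         idx -= 1
--
--     return idx
-- ===== SOURCE B (Python) =====
-- def find_index_of_nth_cycle(commands, n) -> int:
--     # Build the cumulative-cycle prefix array, then binary-search for the
--     # first index whose cumulative cycle count reaches n.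
--     prefix = []
--     total = 0
--     for c in commands:
--         total += 1 if c == "noop" else 2
--         prefix.append(total)
--     lo, hi = 0, len(prefix)
--     while lo < hi:
--         mid = (lo + hi) // 2
--         if prefix[mid] >= n:
--             hi = mid
--         else:
--             lo = mid + 1
--     return lo if lo < len(prefix) else len(commands)
-- ===== Notes on version B (the rewrite author's own statement) =====
-- stated objective: alternative
-- what changed: B builds the cumulative-cycle prefix array in one pass and then binary-searches (bisect_left) for the first index reaching n, instead of A's single scan with break and post-loop index fixup; both are O(k) overall since building the prefix dominates.
-- intended difference: On empty commands with n <= 0, A returns -1 (the post-loop idx -= 1 fires on the untouched loop state, yielding an out-of-range index) while B returns 0 = len(commands), the same not-found value it returns for any non-empty list that never reaches n, which is the intended answer. — e.g. on find_index_of_nth_cycle([], 0): A returns -1, B returns 0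
import Mathlib
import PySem

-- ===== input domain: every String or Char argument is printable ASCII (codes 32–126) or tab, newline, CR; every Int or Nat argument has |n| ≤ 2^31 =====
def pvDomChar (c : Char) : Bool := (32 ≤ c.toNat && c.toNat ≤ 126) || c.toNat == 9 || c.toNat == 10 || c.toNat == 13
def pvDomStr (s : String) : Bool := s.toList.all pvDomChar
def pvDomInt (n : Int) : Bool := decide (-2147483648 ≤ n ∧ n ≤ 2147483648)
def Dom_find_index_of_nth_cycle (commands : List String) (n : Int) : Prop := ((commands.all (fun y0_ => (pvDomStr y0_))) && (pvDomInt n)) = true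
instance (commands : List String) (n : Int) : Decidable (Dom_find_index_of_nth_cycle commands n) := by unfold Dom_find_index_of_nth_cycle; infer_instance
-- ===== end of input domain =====

-- B replaces A's single scan-with-break by a prefix-sum array plus binary search
-- (same O(k) cost; a different decomposition of the search).

-- ===== PORT A =====
-- the for-loop with `break`: carries (cycle, idx); stops early when cycle ≥ n
def find_index_of_nth_cycle_loop (commands : List String) (n cycle idx : Int) : Int × Int :=
  match commands with
  | [] => (cycle, idx)
  | c :: rest =>
    let cycle' := cycle + (if c = "noop" then 1 else 2)
    let idx' := idx + 1
    if n ≤ cycle' then (cycle', idx')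
    else find_index_of_nth_cycle_loop rest n cycle' idx'

def find_index_of_nth_cycle (commands : List String) (n : Int) : Int :=
  let r := find_index_of_nth_cycle_loop commands n 0 0
  if n ≤ r.1 then r.2 - 1 else r.2

-- ===== PORT B =====
-- building `prefix` by appending the running total, exactly as Source B's first loop
def find_index_of_nth_cycle_alt_prefix (commands : List String) : List Int :=
  (commands.foldl (fun (acc : List Int × Int) c =>
      let total := acc.2 + (if c = "noop" then 1 else 2)
      (acc.1 ++ [total], total)) ([], 0)).1

-- the `while lo < hi` binary search; prefix[mid] is always in range here, so
-- getD is exact for Python's prefix[mid]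
def find_index_of_nth_cycle_alt_bsearch (p : List Int) (n : Int) (lo hi : Nat) : Nat :=
  if lo < hi then
    let mid := (lo + hi) / 2
    if n ≤ p.getD mid 0 then find_index_of_nth_cycle_alt_bsearch p n lo mid
    else find_index_of_nth_cycle_alt_bsearch p n (mid + 1) hi
  else lo
termination_by hi - lo
decreasing_by all_goals omega

def find_index_of_nth_cycle_alt (commands : List String) (n : Int) : Int :=
  let p := find_index_of_nth_cycle_alt_prefix commands
  let lo := find_index_of_nth_cycle_alt_bsearch p n 0 p.length
  if lo < p.length then (lo : Int) else (commands.length : Int)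

-- ===== PRECONDITION & SPEC =====
-- On empty commands with n ≤ 0, A returns -1 (the post-loop `idx -= 1` fires on
-- the untouched loop state, an out-of-range index), while B returns 0 =
-- len(commands), the same not-found value as for a non-empty list that never
-- reaches n; B's value is the intended one.
def D_find_index_of_nth_cycle (commands : List String) (n : Int) : Prop :=
  commands = [] ∧ n ≤ 0
instance (commands : List String) (n : Int) : Decidable (D_find_index_of_nth_cycle commands n) := by
  unfold D_find_index_of_nth_cycle; infer_instance

def Spec_find_index_of_nth_cycle (commands : List String) (n : Int) (out : Int) : Prop :=
  ¬ D_find_index_of_nth_cycle commands n → out = find_index_of_nth_cycle_alt commands n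
instance (commands : List String) (n : Int) (out : Int) : Decidable (Spec_find_index_of_nth_cycle commands n out) := by
  unfold Spec_find_index_of_nth_cycle; infer_instance

def pvDiffWitness_find_index_of_nth_cycle : List String × Int := ([], 0)
def pvDiffWitnessOut_find_index_of_nth_cycle : Int × Int := (-1, 0)

-- ===== CLAIM (what is proved, stated in full; the proofs are below) =====
def Claim_unchanged_find_index_of_nth_cycle : Prop := ∀ (commands : List String) (n : Int), Dom_find_index_of_nth_cycle commands n → Spec_find_index_of_nth_cycle commands n (find_index_of_nth_cycle commands n)
def Claim_changed_find_index_of_nth_cycle : Prop := Dom_find_index_of_nth_cycle (pvDiffWitness_find_index_of_nth_cycle.1) (pvDiffWitness_find_index_of_nth_cycle.2) ∧ D_find_index_of_nth_cycle (pvDiffWitness_find_index_of_nth_cycle.1) (pvDiffWitness_find_index_of_nth_cycle.2) ∧ find_index_of_nth_cycle (pvDiffWitness_find_index_of_nth_cycle.1) (pvDiffWitness_find_index_of_nth_cycle.2) = pvDiffWitnessOut_find_index_of_nth_cycle.1 ∧ find_index_of_nth_cycle_alt (pvDiffWitness_find_index_of_nth_cycle.1) (pvDiffWitness_find_index_of_nth_cycle.2)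 = pvDiffWitnessOut_find_index_of_nth_cycle.2 ∧ pvDiffWitnessOut_find_index_of_nth_cycle.1 ≠ pvDiffWitnessOut_find_index_of_nth_cycle.2
def Claim_exact_find_index_of_nth_cycle : Prop := ∀ (commands : List String) (n : Int), Dom_find_index_of_nth_cycle commands n → D_find_index_of_nth_cycle commands n → find_index_of_nth_cycle commands n ≠ find_index_of_nth_cycle_alt commands n

-- ===== LEMMAS AND PROOFS =====

-- proof-side reference: cumulative cycle counts starting from total t
def pvPrefixAux (commands : List String) (t : Int) : List Int :=
  match commands with
  | [] => []
  | c :: rest =>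
    let t' := t + (if c = "noop" then 1 else 2)
    t' :: pvPrefixAux rest t'

-- proof-side reference: first index whose entry reaches n (length if none)
def pvRef (p : List Int) (n : Int) : Nat :=
  match p with
  | [] => 0
  | x :: xs => if n ≤ x then 0 else pvRef xs n + 1

theorem pvPrefixAux_length (commands : List String) (t : Int) :
    (pvPrefixAux commands t).length = commands.length := by
  induction commands generalizing t with
  | nil => rfl
  | cons c rest ih => simp [pvPrefixAux, ih]

theorem alt_prefix_eq_aux (commands : List String) :
    find_index_of_nth_cycle_alt_prefix commands = pvPrefixAux commands 0 := by
  have key : ∀ (cs : List String) (acc : List Int) (t : Int),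
      (cs.foldl (fun (acc : List Int × Int) c =>
        let total := acc.2 + (if c = "noop" then 1 else 2)
        (acc.1 ++ [total], total)) (acc, t)).1 = acc ++ pvPrefixAux cs t := by
    intro cs
    induction cs with
    | nil => intro acc t; simp [pvPrefixAux]
    | cons c rest ih =>
      intro acc t
      simp only [List.foldl_cons, pvPrefixAux]
      rw [ih]
      simp
  simpa using key commands [] 0

theorem pvPrefixAux_le_mem (commands : List String) (t : Int) :
    ∀ x ∈ pvPrefixAux commands t, t + 1 ≤ x := by
  induction commands generalizing t with
  | nil => simp [pvPrefixAux]
  | cons c rest ih =>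
    intro x hx
    simp only [pvPrefixAux, List.mem_cons] at hx
    rcases hx with h | h
    · subst h; split <;> omega
    · have := ih _ x h
      split at this <;> omega

theorem pvPrefixAux_mono (commands : List String) (t : Int) :
    ∀ i j : Nat, i ≤ j → j < (pvPrefixAux commands t).length →
      (pvPrefixAux commands t).getD i 0 ≤ (pvPrefixAux commands t).getD j 0 := by
  induction commands generalizing t with
  | nil => intro i j _ hj; simp [pvPrefixAux] at hj
  | cons c rest ih =>
    intro i j hij hj
    simp only [pvPrefixAux, List.length_cons] at hj ⊢
    match i, j with
    | 0, 0 => simp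
    | 0, j + 1 =>
      simp only [List.getD_cons_zero, List.getD_cons_succ]
      have hjlen : j < (pvPrefixAux rest (t + (if c = "noop" then 1 else 2))).length := by omega
      have hmem : (pvPrefixAux rest (t + (if c = "noop" then 1 else 2))).getD j 0 ∈
          pvPrefixAux rest (t + (if c = "noop" then 1 else 2)) := by
        rw [List.getD_eq_getElem _ _ hjlen]; exact List.getElem_mem _
      have := pvPrefixAux_le_mem rest _ _ hmem
      omega
    | i + 1, j + 1 =>
      simp only [List.getD_cons_succ]
      exact ih _ i j (by omega) (by omega)

theorem pvRef_le_length (p : List Int) (n : Int) : pvRef p n ≤ p.length := by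
  induction p with
  | nil => simp [pvRef]
  | cons x xs ih =>
    simp only [pvRef, List.length_cons]
    by_cases h : n ≤ x
    · simp [h]
    · simp only [if_neg h]; omega

theorem pvRef_lt (p : List Int) (n : Int) :
    ∀ i < pvRef p n, p.getD i 0 < n := by
  induction p with
  | nil => simp [pvRef]
  | cons x xs ih =>
    intro i hi
    simp only [pvRef] at hi
    split at hi
    · omega
    · match i with
      | 0 => simp only [List.getD_cons_zero]; omega
      | i + 1 => simp only [List.getD_cons_succ]; exact ih i (by omega)

theorem pvRef_found (p : List Int) (n : Int) (h : pvRef p n < p.length) :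
    n ≤ p.getD (pvRef p n) 0 := by
  induction p with
  | nil => simp [pvRef] at h
  | cons x xs ih =>
    simp only [pvRef] at h ⊢
    by_cases h' : n ≤ x
    · simp [h']
    · simp only [if_neg h', List.length_cons] at h
      simp only [if_neg h', List.getD_cons_succ]
      exact ih (by omega)

-- any point satisfying the bisect invariants equals pvRef (needs monotone access)
theorem pvRef_uniq (p : List Int) (n : Int) (k : Nat)
    (hk : k ≤ p.length)
    (h1 : ∀ i < k, p.getD i 0 < n)
    (h2 : ∀ i, k ≤ i → i < p.length → n ≤ p.getD i 0) :
    k = pvRef p n := by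
  rcases Nat.lt_trichotomy k (pvRef p n) with h | h | h
  · have := h1 (pvRef p n) -- not directly; use: pvRef ≤ len, k < pvRef
    have hlt : k < p.length := lt_of_lt_of_le h (pvRef_le_length p n)
    have := pvRef_lt p n k h
    have := h2 k (le_refl k) hlt
    omega
  · exact h
  · have hlen : pvRef p n < p.length := lt_of_lt_of_le h hk
    have := pvRef_found p n hlen
    have := h1 (pvRef p n) h
    omega
  
theorem bsearch_inv (p : List Int) (n : Int)
    (hmono : ∀ i j : Nat, i ≤ j → j < p.length → p.getD i 0 ≤ p.getD j 0) :
    ∀ lo hi : Nat, lo ≤ hi → hi ≤ p.length →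
    (∀ i < lo, p.getD i 0 < n) →
    (∀ i, hi ≤ i → i < p.length → n ≤ p.getD i 0) →
    find_index_of_nth_cycle_alt_bsearch p n lo hi = pvRef p n := by
  intro lo hi hlohi hhilen h1 h2
  fun_induction find_index_of_nth_cycle_alt_bsearch p n lo hi with
  | case1 lo hi h mid hmid ih =>
    exact ih (by omega) (by omega) h1 (fun i h1i h2i => by
      have : p.getD mid 0 ≤ p.getD i 0 := hmono mid i (by omega) h2i
      omega)
  | case2 lo hi h mid hmid ih =>
    exact ih (by omega) hhilen (fun i hi2 => by
      have : p.getD i 0 ≤ p.getD mid 0 := hmono i mid (by omega) (by omega)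
      omega) h2
  | case3 lo hi h =>
    have : lo = hi := by omega
    subst this
    exact pvRef_uniq p n lo (by omega) h1 (fun i h1i h2i => h2 i h1i h2i)

theorem alt_eq_ref (commands : List String) (n : Int) :
    find_index_of_nth_cycle_alt commands n = (pvRef (pvPrefixAux commands 0) n : Int) := by
  simp only [find_index_of_nth_cycle_alt, alt_prefix_eq_aux]
  rw [bsearch_inv (pvPrefixAux commands 0) n (pvPrefixAux_mono commands 0) 0
        (pvPrefixAux commands 0).length (by omega) (le_refl _)
        (fun i hi => absurd hi (Nat.not_lt_zero i))
        (fun i h1 h2 => absurd h2 (by omega))]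
  have hlen := pvPrefixAux_length commands 0
  have hle := pvRef_le_length (pvPrefixAux commands 0) n
  split
  · rfl
  · have : pvRef (pvPrefixAux commands 0) n = commands.length := by omega
    rw [this]

-- A's loop breaks at exactly the first index where the running total reaches n
theorem loop_found (commands : List String) (n : Int) :
    ∀ (cycle idx : Int),
      pvRef (pvPrefixAux commands cycle) n < commands.length →
      find_index_of_nth_cycle_loop commands n cycle idx =
        ((pvPrefixAux commands cycle).getD (pvRef (pvPrefixAux commands cycle) n) 0,
         idx + (pvRef (pvPrefixAux commands cycle) n : Int) + 1) := by
  induction commands with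
  | nil => intro cycle idx h; simp [pvPrefixAux, pvRef] at h
  | cons c rest ih =>
    intro cycle idx h
    simp only [pvPrefixAux, pvRef] at h ⊢
    by_cases hb : n ≤ cycle + (if c = "noop" then 1 else 2)
    · simp only [if_pos hb]
      simp [find_index_of_nth_cycle_loop, hb]
    · simp only [if_neg hb] at h ⊢
      simp only [List.getD_cons_succ]
      simp only [find_index_of_nth_cycle_loop, if_neg hb]
      rw [ih _ (idx + 1) (by simp only [List.length_cons] at h; omega)]
      simp only [Prod.mk.injEq]
      exact ⟨trivial, by push_cast; ring⟩

theorem loop_notfound (commands : List String) (n : Int) :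
    ∀ (cycle idx : Int), (cycle < n ∨ commands ≠ []) →
      pvRef (pvPrefixAux commands cycle) n = commands.length →
      (find_index_of_nth_cycle_loop commands n cycle idx).1 < n ∧
      (find_index_of_nth_cycle_loop commands n cycle idx).2 = idx + (commands.length : Int) := by
  induction commands with
  | nil =>
    intro cycle idx hne _
    rcases hne with h | h
    · simpa [find_index_of_nth_cycle_loop] using h
    · simp at h
  | cons c rest ih =>
    intro cycle idx _ h
    simp only [pvPrefixAux, pvRef, List.length_cons] at h
    by_cases hb : n ≤ cycle + (if c = "noop" then 1 else 2)
    · simp only [if_pos hb] at h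
      have := pvRef_le_length (pvPrefixAux rest (cycle + (if c = "noop" then 1 else 2))) n
      omega
    · simp only [if_neg hb] at h
      simp only [find_index_of_nth_cycle_loop, if_neg hb, List.length_cons]
      have := ih (cycle + (if c = "noop" then 1 else 2)) (idx + 1) (Or.inl (by omega)) (by omega)
      refine ⟨this.1, ?_⟩
      rw [this.2]; push_cast; ring

theorem a_eq_ref (commands : List String) (n : Int)
    (hD : ¬ (commands = [] ∧ n ≤ 0)) :
    find_index_of_nth_cycle commands n = (pvRef (pvPrefixAux commands 0) n : Int) := by
  match commands with
  | [] =>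
    have hn : ¬ n ≤ 0 := fun h => hD ⟨rfl, h⟩
    simp only [find_index_of_nth_cycle, find_index_of_nth_cycle_loop, pvPrefixAux, pvRef]
    simp only [if_neg (by omega : ¬ n ≤ (0 : Int))]
    rfl
  | c :: rest =>
    have hlen := pvPrefixAux_length (c :: rest) (0 : Int)
    have hle := pvRef_le_length (pvPrefixAux (c :: rest) 0) n
    by_cases hr : pvRef (pvPrefixAux (c :: rest) 0) n < (c :: rest).length
    · have hf := loop_found (c :: rest) n 0 0 (by omega)
      have hv := pvRef_found (pvPrefixAux (c :: rest) 0) n (by omega)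
      simp only [find_index_of_nth_cycle, hf, if_pos hv]
      ring
    · have heq : pvRef (pvPrefixAux (c :: rest) 0) n = (c :: rest).length := by omega
      have hnf := loop_notfound (c :: rest) n 0 0 (Or.inr (by simp)) (by omega)
      simp only [find_index_of_nth_cycle, if_neg (by omega : ¬ n ≤ (find_index_of_nth_cycle_loop (c :: rest) n 0 0).1)]
      rw [hnf.2, heq]
      ring

-- ===== VERDICT (by name: the statement is the Claim_ definition above) =====
theorem find_index_of_nth_cycle_spec : Claim_unchanged_find_index_of_nth_cycle := by
  intro commands n _ hD
  rw [a_eq_ref commands n hD, alt_eq_ref]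

theorem find_index_of_nth_cycle_changed : Claim_changed_find_index_of_nth_cycle := by
  unfold Claim_changed_find_index_of_nth_cycle; decide

theorem find_index_of_nth_cycle_tight : Claim_exact_find_index_of_nth_cycle := by
  intro commands n _ hD
  obtain ⟨hc, hn⟩ := hD
  subst hc
  simp only [find_index_of_nth_cycle, find_index_of_nth_cycle_loop,
    find_index_of_nth_cycle_alt, find_index_of_nth_cycle_alt_prefix]
  simp only [List.foldl_nil]
  rw [find_index_of_nth_cycle_alt_bsearch]
  simp
  omega
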